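-- pv_equiv track=rewrite | github.com/IKSman14/Lab2webT | lab1.py | sotr
-- ===== SOURCE A (Python) =====
-- def sotr (IntSp):
--     Two = list()
--     Three = list()
--     Four = list()
--     for i in IntSp:
--         if i % 2 == 0:
--             Two.append(i)
--             if i % 4 == 0:
--                 Four.append(i)
--         if i % 3 == 0:
--             Three.append(i)
--     return Two, Three, Four
-- ===== SOURCE B (Python) =====
-- def sotr(IntSp):
--     data = list(IntSp)
--     Two = [i for i in data if i % 2 == 0]
--     Three = [i for i in data if i % 3 == 0]
--     Four = [i for i in data if i % 4 == 0]
--     return Two, Three, Four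
-- ===== Notes on version B (the rewrite author's own statement) =====
-- stated objective: idiomatic
-- what changed: A builds all three lists in one pass with Four nested inside the Two branch; B materializes the input and builds each list with an independent filter comprehension.
import Mathlib
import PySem

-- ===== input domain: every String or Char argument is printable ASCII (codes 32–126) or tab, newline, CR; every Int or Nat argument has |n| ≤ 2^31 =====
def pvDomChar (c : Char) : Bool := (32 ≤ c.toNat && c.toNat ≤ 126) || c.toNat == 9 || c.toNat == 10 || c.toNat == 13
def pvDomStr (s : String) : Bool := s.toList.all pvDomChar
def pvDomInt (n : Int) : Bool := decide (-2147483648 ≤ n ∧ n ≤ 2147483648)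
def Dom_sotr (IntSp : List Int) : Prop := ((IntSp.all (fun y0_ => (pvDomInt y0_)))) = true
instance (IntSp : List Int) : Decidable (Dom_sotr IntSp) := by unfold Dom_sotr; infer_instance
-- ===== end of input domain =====

-- B replaces A's single accumulating pass (with Four nested inside the Two branch) by three independent filters; objective: idiomatic.

-- ===== PORT A =====
-- one pass, three accumulators; Four only tested inside the `i % 2 == 0` branch
def sotrLoop (IntSp : List Int) (two three four : List Int) :
    List Int × List Int × List Int :=
  match IntSp with
  | [] => (two, three, four)
  | i :: rest =>
      let two' := if PySem.Int.mod i 2 = 0 then two ++ [i] else two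
      let four' := if PySem.Int.mod i 2 = 0 then
          (if PySem.Int.mod i 4 = 0 then four ++ [i] else four) else four
      let three' := if PySem.Int.mod i 3 = 0 then three ++ [i] else three
      sotrLoop rest two' three' four'

def sotr (IntSp : List Int) : List Int × List Int × List Int :=
  sotrLoop IntSp [] [] []

-- ===== PORT B =====
def sotr_alt (IntSp : List Int) : List Int × List Int × List Int :=
  let data := IntSp
  (data.filter (fun i => PySem.Int.mod i 2 = 0),
   data.filter (fun i => PySem.Int.mod i 3 = 0),
   data.filter (fun i => PySem.Int.mod i 4 = 0))

-- ===== PRECONDITION & SPEC =====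
def Spec_sotr (IntSp : List Int) (out : List Int × List Int × List Int) : Prop := out = sotr_alt IntSp
instance (IntSp : List Int) (out : List Int × List Int × List Int) : Decidable (Spec_sotr IntSp out) := by unfold Spec_sotr; infer_instance

-- ===== CLAIM (what is proved, stated in full; the proofs are below) =====
def Claim_equal_sotr : Prop := ∀ (IntSp : List Int), Dom_sotr IntSp → Spec_sotr IntSp (sotr IntSp)

-- ===== LEMMAS AND PROOFS =====

-- loop invariant: sotrLoop appends the three filters to the accumulators
lemma sotrLoop_eq (IntSp : List Int) (two three four : List Int) :
    sotrLoop IntSp two three four =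
      (two ++ IntSp.filter (fun i => decide (PySem.Int.mod i 2 = 0)),
       three ++ IntSp.filter (fun i => decide (PySem.Int.mod i 3 = 0)),
       four ++ IntSp.filter (fun i => decide (PySem.Int.mod i 4 = 0))) := by
  induction IntSp generalizing two three four with
  | nil => simp [sotrLoop]
  | cons i rest ih =>
      simp only [sotrLoop, ih, List.filter_cons]
      by_cases h2 : (2 : Int) ∣ i
      · by_cases h3 : (3 : Int) ∣ i <;> by_cases h4 : (4 : Int) ∣ i <;>
          simp [PySem.Int.mod, ← Int.dvd_iff_fmod_eq_zero, h2, h3, h4]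
      · have h4 : ¬ (4 : Int) ∣ i := fun h => h2 (dvd_trans ⟨2, by norm_num⟩ h)
        by_cases h3 : (3 : Int) ∣ i <;>
          simp [PySem.Int.mod, ← Int.dvd_iff_fmod_eq_zero, h2, h3, h4]

-- ===== VERDICT (by name: the statement is the Claim_ definition above) =====
theorem sotr_spec : Claim_equal_sotr := by
  intro IntSp _
  unfold Spec_sotr sotr sotr_alt
  simp [sotrLoop_eq]
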